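-- pv_equiv track=rewrite | github.com/BeeAnka/EFMlrs | efmlrs/preprocessing/boundaries.py | extend_reactions
-- ===== SOURCE A (Python) =====
-- def get_bounds_index(reas, bounds):
--     index_bounds = []
--     for rea, bound in bounds.items():
--         i = 0
--         for reaction in reas:
--             name = rea[:-4]
--             if reaction == name:
--                 index_bounds.append(i)
--             i += 1
--     return index_bounds
--
-- def extend_reactions(bounds, reactions):
--     index_bounds = get_bounds_index(reactions, bounds)
--     extended_reas = []
--     j = 0
--     for rea, bounds in bounds.items():
--         tmp = []
--         for i in range(len(reactions)):
--             if i == index_bounds[j]: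
--                 if rea[-3:] == "max":
--                     tmp.append(1)
--                 else:
--                     tmp.append(-1)
--             else:
--                 tmp.append(0)
--         j += 1
--         extended_reas.append(tmp)
--     return extended_reas
-- ===== SOURCE B (Python) =====
-- def extend_reactions(bounds, reactions):
--     first = {}
--     for i, r in enumerate(reactions):
--         if r not in first:
--             first[r] = i
--     rows = []
--     for rea in bounds:
--         idx = first[rea[:-4]]
--         row = [0] * len(reactions)
--         row[idx] = 1 if rea[-3:] == "max" else -1
--         rows.append(row)
--     return rows
-- ===== Notes on version B (the rewrite author's own statement) =====
-- stated objective: simpler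
-- what changed: B builds one first-occurrence name-to-index dict over reactions and constructs each indicator row directly by setting one position, replacing A's separate flat match-index list, parallel j counter and per-cell comparison loop.
-- intended difference: When some bound's base name matches a duplicated reaction so that A's flat index list misaligns with the bound counter j, A returns rows whose 1/-1 sits at a wrong (earlier-match) position, while B marks the first occurrence of each bound's own reaction, which is the intended indicator. — e.g. on extend_reactions([("a_min", 0), ("b_min", 0)], ["a", "a", "b"]): A returns [[-1, 0, 0], [0, -1, 0]], B returns [[-1, 0, 0], [0, 0, -1]]
-- outside the precondition, e.g. on extend_reactions({'q_min': 0}, []): A returns [[]], B raises KeyError; on extend_reactions({'a_min': 0, 'q_min': 0}, ['a', 'a']): A returns [[-1, 0], [0, -1]], B raises KeyError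
import Mathlib
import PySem

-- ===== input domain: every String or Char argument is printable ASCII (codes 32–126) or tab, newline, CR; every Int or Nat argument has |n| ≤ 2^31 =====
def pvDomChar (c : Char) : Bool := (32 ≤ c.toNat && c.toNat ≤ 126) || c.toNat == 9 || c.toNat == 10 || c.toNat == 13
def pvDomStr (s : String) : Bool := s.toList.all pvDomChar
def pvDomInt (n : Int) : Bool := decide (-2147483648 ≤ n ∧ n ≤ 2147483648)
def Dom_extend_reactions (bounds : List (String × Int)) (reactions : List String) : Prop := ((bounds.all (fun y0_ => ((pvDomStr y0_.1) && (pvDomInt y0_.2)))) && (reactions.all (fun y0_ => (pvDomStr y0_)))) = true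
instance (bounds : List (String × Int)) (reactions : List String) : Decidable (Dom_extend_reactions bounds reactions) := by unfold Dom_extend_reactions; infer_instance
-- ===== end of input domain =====

-- B replaces A's flat match-index list and parallel j counter by a first-occurrence
-- name-to-index dict and direct construction of each indicator row (objective: simpler).

-- rea[:-4] and rea[-3:] (shared pure string helpers, exact Python slices)
def pyBase (s : String) : String := PySem.Str.slice s none (some (-4))
def pySuf3 (s : String) : String := PySem.Str.slice s (some (-3)) none

-- ===== PORT A =====
def get_bounds_index (reas : List String) (bounds : List (String × Int)) : List Int :=
  bounds.foldl (fun index_bounds p =>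
    (reas.foldl (fun (st : List Int × Nat) reaction =>
        let name := pyBase p.1
        ((if reaction == name then st.1 ++ [(st.2 : Int)] else st.1), st.2 + 1))
      (index_bounds, 0)).1) []

def extend_reactions (bounds : List (String × Int)) (reactions : List String) : List (List Int) :=
  let index_bounds := get_bounds_index reactions bounds
  (bounds.foldl (fun (st : List (List Int) × Nat) p =>
      let tmp := (List.range reactions.length).foldl (fun tmp (i : Nat) =>
          -- index_bounds[j]: the IndexError case (out of range) is outside Pre_; default -1 equals no i
          if ((i : Int) == index_bounds.getD st.2 (-1)) then
            (if pySuf3 p.1 == "max" then tmp ++ [(1 : Int)] else tmp ++ [(-1 : Int)])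
          else tmp ++ [(0 : Int)]) []
      (st.1 ++ [tmp], st.2 + 1)) ([], 0)).1

-- ===== PORT B =====
def extend_reactions_alt (bounds : List (String × Int)) (reactions : List String) : List (List Int) :=
  let first : PySem.Dict String Int :=
    (PySem.List.enumerate reactions 0).foldl
      (fun d q => if (d.get? q.2).isSome then d else d.insert q.2 q.1) ∅
  bounds.map (fun p =>
    -- first[rea[:-4]]: the KeyError case (name absent) is outside Pre_
    let idx := ((first.get? (pyBase p.1)).getD 0)
    -- row[idx] = v: idx is an enumerate index, hence ≥ 0, so .toNat is exact
    (List.replicate reactions.length (0 : Int)).set idx.toNat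
      (if pySuf3 p.1 == "max" then 1 else -1))

-- ===== PRECONDITION & SPEC =====
-- Pre_ excludes (a) association lists with duplicate keys (a Python dict cannot carry them) and
-- (b) bounds whose base name rea[:-4] occurs in no reaction: there A raises IndexError at some row
-- (or, when reactions is empty or other bounds' duplicate matches pad the flat index list, returns
-- rows whose indices never belonged to that bound) and B's dict lookup raises KeyError.
def Pre_extend_reactions (bounds : List (String × Int)) (reactions : List String) : Prop :=
  (bounds.map Prod.fst).Nodup ∧ ∀ p ∈ bounds, pyBase p.1 ∈ reactions

instance (bounds : List (String × Int)) (reactions : List String) : Decidable (Pre_extend_reactions bounds reactions) := by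
  unfold Pre_extend_reactions; infer_instance

def pvWitness_extend_reactions : (List (String × Int)) × List String := ([("a_min", 0)], ["a"])

-- the flat list of matching reaction indices A's helper gathers, described independently
def flatIdxs (bounds : List (String × Int)) (reactions : List String) : List Nat :=
  bounds.flatMap (fun p => List.findIdxs (fun r => r == pyBase p.1) reactions)

-- On bounds whose base name matches a duplicated reaction so that the flat index list misaligns
-- with the row counter j, A marks a wrong (earlier-match) reaction position, while B marks the
-- first occurrence of that bound's own reaction — the intended indicator.
def D_extend_reactions (bounds : List (String × Int)) (reactions : List String) : Prop :=
  ∃ j < bounds.length,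
    (flatIdxs bounds reactions)[j]? ≠ (bounds[j]?.map (fun p => List.idxOf (pyBase p.1) reactions))

instance (bounds : List (String × Int)) (reactions : List String) : Decidable (D_extend_reactions bounds reactions) := by
  unfold D_extend_reactions; infer_instance

def Spec_extend_reactions (bounds : List (String × Int)) (reactions : List String) (out : List (List Int)) : Prop :=
  ¬ D_extend_reactions bounds reactions → out = extend_reactions_alt bounds reactions

instance (bounds : List (String × Int)) (reactions : List String) (out : List (List Int)) : Decidable (Spec_extend_reactions bounds reactions out) := by
  unfold Spec_extend_reactions; infer_instance

def pvDiffWitness_extend_reactions : (List (String × Int)) × List String :=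
  ([("a_min", 0), ("b_min", 0)], ["a", "a", "b"])

def pvDiffWitnessOut_extend_reactions : (List (List Int)) × (List (List Int)) :=
  ([[-1, 0, 0], [0, -1, 0]], [[-1, 0, 0], [0, 0, -1]])

-- ===== CLAIM (what is proved, stated in full; the proofs are below) =====
def Claim_unchanged_extend_reactions : Prop := ∀ (bounds : List (String × Int)) (reactions : List String), Dom_extend_reactions bounds reactions → Pre_extend_reactions bounds reactions → Spec_extend_reactions bounds reactions (extend_reactions bounds reactions)
def Claim_changed_extend_reactions : Prop := Dom_extend_reactions (pvDiffWitness_extend_reactions.1) (pvDiffWitness_extend_reactions.2) ∧ Pre_extend_reactions (pvDiffWitness_extend_reactions.1) (pvDiffWitness_extend_reactions.2) ∧ D_extend_reactions (pvDiffWitness_extend_reactions.1) (pvDiffWitness_extend_reactions.2) ∧ extend_reactions (pvDiffWitness_extend_reactions.1) (pvDiffWitness_extend_reactions.2) = pvDiffWitnessOut_extend_reactions.1 ∧ extend_reactions_alt (pvDiffWitness_extend_reactions.1) (pvDiffWitness_extend_reactions.2) = pvDiffWitnessOut_extend_reactions.2 ∧ pvDiffWitnessOut_extend_reactions.1 ≠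 pvDiffWitnessOut_extend_reactions.2
def Claim_exact_extend_reactions : Prop := ∀ (bounds : List (String × Int)) (reactions : List String), Dom_extend_reactions bounds reactions → Pre_extend_reactions bounds reactions → D_extend_reactions bounds reactions → extend_reactions bounds reactions ≠ extend_reactions_alt bounds reactions

-- ===== LEMMAS AND PROOFS =====

-- A's inner counting loop produces exactly the matching indices (with start offset)
theorem innerA_eq (name : String) (reas : List String) (acc : List Int) (s : Nat) :
    (reas.foldl (fun (st : List Int × Nat) reaction =>
        ((if reaction == name then st.1 ++ [(st.2 : Int)] else st.1), st.2 + 1)) (acc, s)).1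
    = acc ++ (List.findIdxs (fun r => r == name) reas s).map Int.ofNat := by
  induction reas generalizing acc s with
  | nil => simp [List.findIdxs]
  | cons r rs ih =>
      simp only [List.foldl_cons, List.findIdxs_cons]
      by_cases h : (r == name) = true
      · rw [if_pos h, if_pos h, ih]; simp
      · rw [if_neg h, if_neg h, ih]

theorem gbi_eq (reactions : List String) (bounds : List (String × Int)) :
    get_bounds_index reactions bounds = (flatIdxs bounds reactions).map Int.ofNat := by
  have h1 : get_bounds_index reactions bounds
      = bounds.foldl (fun ib p =>
          ib ++ (List.findIdxs (fun r => r == pyBase p.1) reactions).map Int.ofNat) [] := by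
    simp only [get_bounds_index, innerA_eq]
  rw [h1, PySem.List.foldl_append_eq_flatMap]
  simp [flatIdxs, List.map_flatMap]

-- basic facts about findIdxs
theorem findIdxs_lt {α : Type} (p : α → Bool) (l : List α) (s k : Nat)
    (hk : k ∈ List.findIdxs p l s) : k < s + l.length := by
  rw [List.mem_findIdxs_iff_getElem_sub_pos] at hk
  obtain ⟨hs, hlt, -⟩ := hk
  omega

theorem findIdxs_ne_nil {name : String} {l : List String} (h : name ∈ l) (s : Nat) :
    List.findIdxs (fun r => r == name) l s ≠ [] := by
  obtain ⟨i, hi, hval⟩ := List.mem_iff_getElem.mp h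
  apply List.ne_nil_of_mem (a := s + i)
  rw [List.mem_findIdxs_iff_getElem_sub_pos]
  refine ⟨by omega, by simpa using hi, ?_⟩
  simp [hval]

theorem flatIdxs_long {bounds : List (String × Int)} {reactions : List String}
    (h : ∀ p ∈ bounds, pyBase p.1 ∈ reactions) :
    bounds.length ≤ (flatIdxs bounds reactions).length := by
  induction bounds with
  | nil => simp [flatIdxs]
  | cons p ps ih =>
      have h1 := findIdxs_ne_nil (h p (by simp)) 0
      have h2 := ih (fun q hq => h q (by simp [hq]))
      simp only [flatIdxs, List.flatMap_cons, List.length_append, List.length_cons]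
      have : 1 ≤ (List.findIdxs (fun r => r == pyBase p.1) reactions 0).length :=
        List.length_pos_of_ne_nil h1
      simp only [flatIdxs] at h2
      omega

theorem flatIdxs_mem_lt {bounds : List (String × Int)} {reactions : List String}
    {m : Nat} (h : m ∈ flatIdxs bounds reactions) : m < reactions.length := by
  simp only [flatIdxs, List.mem_flatMap] at h
  obtain ⟨p, -, hm⟩ := h
  have := findIdxs_lt (fun r => r == pyBase p.1) reactions 0 m hm
  omega

theorem flat_get {bounds : List (String × Int)} {reactions : List String}
    (hpre : ∀ p ∈ bounds, pyBase p.1 ∈ reactions) {j : Nat} (hj : j < bounds.length) :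
    ∃ m, (flatIdxs bounds reactions)[j]? = some m ∧ m < reactions.length := by
  have hjl : j < (flatIdxs bounds reactions).length := lt_of_lt_of_le hj (flatIdxs_long hpre)
  exact ⟨_, List.getElem?_eq_getElem hjl, flatIdxs_mem_lt (List.getElem_mem hjl)⟩

-- A's whole computation as a map over indexed bounds
theorem extend_reactions_eq_map (bounds : List (String × Int)) (reactions : List String) :
    extend_reactions bounds reactions
    = (bounds.zipIdx).map (fun q =>
        (List.range reactions.length).map (fun (i : Nat) =>
          if ((i : Int) == (get_bounds_index reactions bounds).getD q.2 (-1)) then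
            (if pySuf3 q.1.1 == "max" then (1 : Int) else -1)
          else 0)) := by
  unfold extend_reactions
  suffices h : ∀ (bs : List (String × Int)) (acc : List (List Int)) (j : Nat),
      (bs.foldl (fun (st : List (List Int) × Nat) p =>
        ((st.1 ++ [(List.range reactions.length).foldl (fun tmp (i : Nat) =>
          if ((i : Int) == (get_bounds_index reactions bounds).getD st.2 (-1)) then
            (if pySuf3 p.1 == "max" then tmp ++ [(1 : Int)] else tmp ++ [(-1 : Int)])
          else tmp ++ [(0 : Int)]) []]), st.2 + 1)) (acc, j)).1
      = acc ++ (bs.zipIdx j).map (fun q =>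
          (List.range reactions.length).map (fun (i : Nat) =>
            if ((i : Int) == (get_bounds_index reactions bounds).getD q.2 (-1)) then
              (if pySuf3 q.1.1 == "max" then (1 : Int) else -1)
            else 0)) by
    simpa using h bounds [] 0
  intro bs
  induction bs with
  | nil => intro acc j; simp
  | cons p ps ih =>
      intro acc j
      have hrow : (fun (tmp : List Int) (i : Nat) =>
          if ((i : Int) == (get_bounds_index reactions bounds).getD j (-1)) then
            (if pySuf3 p.1 == "max" then tmp ++ [(1 : Int)] else tmp ++ [(-1 : Int)])
          else tmp ++ [(0 : Int)])
          = fun tmp (i : Nat) => tmp ++ [if ((i : Int) == (get_bounds_index reactions bounds).getD j (-1)) then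
              (if pySuf3 p.1 == "max" then (1 : Int) else -1) else 0] := by
        funext tmp i; split_ifs <;> rfl
      simp only [List.foldl_cons, List.zipIdx_cons, List.map_cons, ih, hrow,
        PySem.List.foldl_append_singleton_eq_map]
      simp [List.append_assoc]

-- B's first-occurrence dict lookup is List.idxOf
theorem firstDict_get (rs : List String) :
    ∀ (d : PySem.Dict String Int) (i0 : Int) (name : String),
    ((PySem.List.enumerate rs i0).foldl
        (fun d q => if (d.get? q.2).isSome then d else d.insert q.2 q.1) d).get? name
    = (match d.get? name with
       | some w => some w
       | none => if name ∈ rs then some (i0 + List.idxOf name rs) else none) := by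
  induction rs with
  | nil => intro d i0 name; cases h : d.get? name <;> simp [PySem.List.enumerate, h]
  | cons r rs' ih =>
      intro d i0 name
      show ((PySem.List.enumerate rs' (i0 + 1)).foldl _
        (if (d.get? r).isSome then d else d.insert r i0)).get? name = _
      rw [ih]
      by_cases hnr : name = r
      · subst hnr
        by_cases hd : (d.get? name).isSome
        · rw [if_pos hd]
          obtain ⟨w, hw⟩ := Option.isSome_iff_exists.mp hd
          simp [hw]
        · rw [if_neg hd]
          have h0 : d.get? name = none := Option.not_isSome_iff_eq_none.mp hd
          simp [h0, PySem.Dict.get?_insert_self]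
      · by_cases hd : (d.get? r).isSome
        · rw [if_pos hd]
          cases h : d.get? name with
          | some w => simp
          | none =>
              have hbr : (r == name) = false := beq_eq_false_iff_ne.mpr (Ne.symm hnr)
              simp only [List.idxOf_cons, hbr, cond_false, List.mem_cons]
              by_cases hmem : name ∈ rs'
              · simp only [hmem, if_true, hnr, false_or, Option.some.injEq]
                push_cast
                omega
              · simp [hmem, hnr]
        · rw [if_neg hd, PySem.Dict.get?_insert_of_ne _ _ hnr]
          cases h : d.get? name with
          | some w => simp
          | none =>
              have hbr : (r == name) = false := beq_eq_false_iff_ne.mpr (Ne.symm hnr)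
              simp only [List.idxOf_cons, hbr, cond_false, List.mem_cons]
              by_cases hmem : name ∈ rs'
              · simp only [hmem, if_true, hnr, false_or, Option.some.injEq]
                push_cast
                omega
              · simp [hmem, hnr]

theorem alt_idx {reactions : List String} {name : String} (h : name ∈ reactions) :
    (((PySem.List.enumerate reactions 0).foldl
        (fun d q => if (d.get? q.2).isSome then d else d.insert q.2 q.1)
        (∅ : PySem.Dict String Int)).get? name)
    = some ((List.idxOf name reactions : Nat) : Int) := by
  rw [firstDict_get]
  have h0 : (∅ : PySem.Dict String Int).get? name = none := by
    simp [pysem]; exact List.not_mem_nil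
  simp [h0, h]

theorem row_eq {n k : Nat} (hk : k < n) (v : Int) :
    (List.range n).map (fun (i : Nat) => if ((i : Int) == (k : Int)) then v else 0)
    = (List.replicate n (0 : Int)).set k v := by
  apply List.ext_getElem (by simp)
  intro i h1 h2
  simp only [List.getElem_map, List.getElem_range, List.getElem_set, List.getElem_replicate]
  rcases eq_or_ne i k with rfl | hne
  · simp
  · have : ((i : Int) == (k : Int)) = false :=
      beq_eq_false_iff_ne.mpr (by exact_mod_cast hne)
    simp [this, Ne.symm hne]

theorem row_v_ne_zero (s : String) : (if pySuf3 s == "max" then (1 : Int) else -1) ≠ 0 := by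
  split_ifs <;> decide

-- ===== VERDICT (by name: the statement is the Claim_ definition above) =====
theorem extend_reactions_spec : Claim_unchanged_extend_reactions := by
  intro bounds reactions _ hpre hND
  obtain ⟨-, hmem⟩ := hpre
  show extend_reactions bounds reactions = extend_reactions_alt bounds reactions
  rw [extend_reactions_eq_map]
  simp only [extend_reactions_alt]
  apply List.ext_getElem (by simp)
  intro j h1 h2
  have hj : j < bounds.length := by simpa using h2
  simp only [List.getElem_map, List.getElem_zipIdx, Nat.zero_add]
  obtain ⟨m, hm, hmlt⟩ := flat_get hmem hj
  have hAidx : (get_bounds_index reactions bounds).getD j (-1) = (m : Int) := by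
    rw [gbi_eq, List.getD_eq_getElem?_getD, List.getElem?_map, hm]
    simp
  have hDval : m = List.idxOf (pyBase (bounds[j]'hj).1) reactions := by
    by_contra hne
    exact hND ⟨j, hj, by rw [hm, List.getElem?_eq_getElem hj]; simp [hne]⟩
  have hmemj : pyBase ((bounds[j]'hj).1) ∈ reactions := hmem _ (List.getElem_mem hj)
  rw [alt_idx hmemj]
  simp only [Option.getD_some, Int.toNat_natCast]
  rw [hAidx, hDval]
  exact row_eq (List.idxOf_lt_length_of_mem hmemj) _

theorem extend_reactions_changed : Claim_changed_extend_reactions := by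
  unfold Claim_changed_extend_reactions; decide

theorem extend_reactions_tight : Claim_exact_extend_reactions := by
  intro bounds reactions _ hpre hD heq
  obtain ⟨-, hmem⟩ := hpre
  obtain ⟨j, hj, hne⟩ := hD
  obtain ⟨m, hm, hmlt⟩ := flat_get hmem hj
  have hmemj : pyBase ((bounds[j]'hj).1) ∈ reactions := hmem _ (List.getElem_mem hj)
  set idx := List.idxOf (pyBase ((bounds[j]'hj).1)) reactions with hidx
  have hidxlt : idx < reactions.length := List.idxOf_lt_length_of_mem hmemj
  have hmne : m ≠ idx := by
    rw [hm, List.getElem?_eq_getElem hj] at hne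
    simpa [hidx] using hne
  rw [extend_reactions_eq_map] at heq
  simp only [extend_reactions_alt] at heq
  have hAidx : (get_bounds_index reactions bounds).getD j (-1) = (m : Int) := by
    rw [gbi_eq, List.getD_eq_getElem?_getD, List.getElem?_map, hm]
    simp
  have hrow := congrArg (fun (L : List (List Int)) => L[j]?) heq
  simp only [List.getElem?_map, List.getElem?_eq_getElem hj,
    List.getElem?_eq_getElem (by simpa using hj : j < bounds.zipIdx.length),
    List.getElem_zipIdx, Nat.zero_add, Option.map_some, Option.some.injEq] at hrow
  rw [hAidx, alt_idx hmemj] at hrow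
  simp only [Option.getD_some, Int.toNat_natCast] at hrow
  have hcell := congrArg (fun (r : List Int) => r[idx]?) hrow
  have hblt : ((idx : Int) == (m : Int)) = false := by
    apply beq_eq_false_iff_ne.mpr
    exact_mod_cast Ne.symm hmne
  simp only [List.getElem?_map, List.getElem?_eq_getElem (by simpa using hidxlt :
      idx < (List.range reactions.length).length),
    List.getElem_range, Option.map_some] at hcell
  rw [List.getElem?_set_self (by simpa using hidxlt)] at hcell
  simp only [hblt, if_false, Bool.false_eq_true, Option.some.injEq] at hcell
  exact row_v_ne_zero _ hcell.symm
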